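-- pv_equiv track=rewrite | github.com/97GRC/gcam_P2_10319592-CEN0336 | function.py | Frames
-- ===== SOURCE A (Python) =====
-- def Frames(seq):
-- 	frame1 = [seq[i:i+3] for i in range(0, len(seq),3)]
-- 	frame2 = [seq[i:i+3] for i in range(1, len(seq), 3)]
-- 	frame3 = [seq[i:i+3] for i in range(2, len(seq), 3)]
-- 	frame4 = [seq[i:i+3] for i in range(3, len(seq), 3)]
-- 	frame5 = [seq[i:i+3] for i in range(4, len(seq), 3)]
-- 	frame6 = [seq[i:i+3] for i in range(5, len(seq), 3)]
-- 	Frames = [frame1, frame2, frame3, frame4, frame5, frame6]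
-- 	return Frames
-- ===== SOURCE B (Python) =====
-- def Frames(seq):
--     def chunks(start):
--         out = []
--         i = start
--         while i < len(seq):
--             out.append(seq[i:i+3])
--             i += 3
--         return out
--     f1, f2, f3 = chunks(0), chunks(1), chunks(2)
--     return [f1, f2, f3, f1[1:], f2[1:], f3[1:]]
-- ===== Notes on version B (the rewrite author's own statement) =====
-- stated objective: alternative
-- what changed: B builds only the offset-0/1/2 frames with one index-based while-loop helper and derives frames 4-6 as the tails (f[1:]) of frames 1-3, instead of A's six independent range comprehensions.
import Mathlib
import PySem

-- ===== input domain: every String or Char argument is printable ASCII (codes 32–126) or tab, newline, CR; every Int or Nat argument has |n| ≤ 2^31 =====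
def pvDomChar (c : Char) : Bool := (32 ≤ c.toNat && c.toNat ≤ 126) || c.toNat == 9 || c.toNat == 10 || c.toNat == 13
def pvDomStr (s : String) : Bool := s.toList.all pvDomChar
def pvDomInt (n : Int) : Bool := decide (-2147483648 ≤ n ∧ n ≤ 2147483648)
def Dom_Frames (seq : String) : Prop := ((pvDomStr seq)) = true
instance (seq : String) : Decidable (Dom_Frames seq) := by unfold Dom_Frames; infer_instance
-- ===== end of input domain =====

-- B builds only the offset-0/1/2 frames with a single while-loop helper and derives
-- frames 4-6 as the tails (f[1:]) of frames 1-3, instead of A's six independent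
-- index-range comprehensions; an alternative decomposition of the same task.


-- ===== PORT A =====
-- each frameK is the comprehension [seq[i:i+3] for i in range(start, len(seq), 3)]
def Frames (seq : String) : List (List String) :=
  let n := PySem.Str.len seq
  let frame1 := (PySem.List.pyRange 0 n 3).map (fun i => PySem.Str.slice seq (some i) (some (i + 3)))
  let frame2 := (PySem.List.pyRange 1 n 3).map (fun i => PySem.Str.slice seq (some i) (some (i + 3)))
  let frame3 := (PySem.List.pyRange 2 n 3).map (fun i => PySem.Str.slice seq (some i) (some (i + 3)))
  let frame4 := (PySem.List.pyRange 3 n 3).map (fun i => PySem.Str.slice seq (some i) (some (i + 3)))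
  let frame5 := (PySem.List.pyRange 4 n 3).map (fun i => PySem.Str.slice seq (some i) (some (i + 3)))
  let frame6 := (PySem.List.pyRange 5 n 3).map (fun i => PySem.Str.slice seq (some i) (some (i + 3)))
  [frame1, frame2, frame3, frame4, frame5, frame6]

-- ===== PORT B =====
-- B's helper 'chunks(start)': while i < len(seq): out.append(seq[i:i+3]); i += 3
def chunksB (seq : String) (i : Int) : List String :=
  if h : i < PySem.Str.len seq then
    PySem.Str.slice seq (some i) (some (i + 3)) :: chunksB seq (i + 3)
  else []
termination_by (PySem.Str.len seq - i).toNat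
decreasing_by omega

def Frames_alt (seq : String) : List (List String) :=
  let f1 := chunksB seq 0
  let f2 := chunksB seq 1
  let f3 := chunksB seq 2
  [f1, f2, f3,
   PySem.List.slice f1 (some 1) none,
   PySem.List.slice f2 (some 1) none,
   PySem.List.slice f3 (some 1) none]

-- ===== PRECONDITION & SPEC =====
def Spec_Frames (seq : String) (out : List (List String)) : Prop := out = Frames_alt seq
instance (seq : String) (out : List (List String)) : Decidable (Spec_Frames seq out) := by unfold Spec_Frames; infer_instance

-- ===== CLAIM (what is proved, stated in full; the proofs are below) =====
def Claim_equal_Frames : Prop := ∀ (seq : String), Dom_Frames seq → Spec_Frames seq (Frames seq)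

-- ===== LEMMAS AND PROOFS =====

-- step-3 range analogues of the pyRange_one induction lemmas
theorem pyRange3_eq_nil {a b : Int} (h : b ≤ a) : PySem.List.pyRange a b 3 = [] := by
  rw [PySem.List.pyRange_of_pos a b (by norm_num)]
  simp [if_neg (not_lt.mpr h)]

theorem pyRange3_cons {a b : Int} (h : a < b) : PySem.List.pyRange a b 3 = a :: PySem.List.pyRange (a + 3) b 3 := by
  rw [PySem.List.pyRange_of_pos a b (by norm_num), PySem.List.pyRange_of_pos (a + 3) b (by norm_num)]
  rw [if_pos h]
  have key : (b - a + 3 - 1) / 3 = (b - (a + 3) + 3 - 1) / 3 + 1 := by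
    have : b - a + 3 - 1 = (b - (a + 3) + 3 - 1) + 1 * 3 := by ring
    rw [this, Int.add_mul_ediv_right _ _ (by norm_num)]
  by_cases h3 : a + 3 < b
  · rw [if_pos h3, key]
    have hnn : 0 ≤ (b - (a + 3) + 3 - 1) / 3 := by
      apply Int.ediv_nonneg <;> omega
    rw [Int.toNat_add hnn (by norm_num)]
    simp only [Int.toNat_one]
    rw [List.range_succ_eq_map]
    simp only [List.map_cons, List.map_map]
    refine List.cons_eq_cons.mpr ⟨by norm_num, ?_⟩
    apply List.map_congr_left; intro k _; simp only [Function.comp_apply]; push_cast; ring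
  · rw [if_neg h3]
    have h1 : (b - a + 3 - 1) / 3 = 1 := by omega
    rw [h1]
    simp

-- A's frame starting at offset a is exactly B's chunks-loop started at i = a
theorem frame_eq (s : String) (a : Int) :
    (PySem.List.pyRange a (PySem.Str.len s) 3).map (fun i => PySem.Str.slice s (some i) (some (i + 3)))
      = chunksB s a := by
  rw [chunksB]
  by_cases h : a < PySem.Str.len s
  · rw [dif_pos h, pyRange3_cons h, List.map_cons, frame_eq s (a + 3)]
  · rw [dif_neg h, pyRange3_eq_nil (not_lt.mp h), List.map_nil]
termination_by (PySem.Str.len s - a).toNat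
decreasing_by omega

-- dropping the leading codon of the chunks-loop at i advances it to i + 3
theorem chunksB_tail (s : String) (a : Int) :
    PySem.List.slice (chunksB s a) (some 1) none = chunksB s (a + 3) := by
  rw [PySem.List.slice_from_one]
  by_cases h : a < PySem.Str.len s
  · rw [chunksB, dif_pos h, List.tail_cons]
  · rw [chunksB, dif_neg h, chunksB, dif_neg (by omega), List.tail_nil]

-- ===== VERDICT (by name: the statement is the Claim_ definition above) =====
theorem Frames_spec : Claim_equal_Frames := by
  intro seq _
  unfold Spec_Frames Frames Frames_alt
  dsimp only
  rw [frame_eq seq 0, frame_eq seq 1, frame_eq seq 2, frame_eq seq 3, frame_eq seq 4, frame_eq seq 5,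
    chunksB_tail seq 0, chunksB_tail seq 1, chunksB_tail seq 2]
  norm_num
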